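-- pv_equiv track=rewrite | github.com/NKalavros/scMEDALTpy | ComputeDistance_optimized.py | zerodisthelper_original
-- ===== SOURCE A (Python) =====
-- import copy
--
-- def distcalc_original(node1, node2):
--     assert len(node1) == len(node2)
--     if len(node1) == 1:
--         return abs(node1[0] - node2[0])
--     else:
--         d = 0
--         newlist = copy.deepcopy(node1)
--         for i in range(0, len(node2)):
--             newlist[i] -= node2[i]
--         while newlist:
--             if newlist[0] == 0:
--                 newlist.pop(0)
--             elif newlist[0] > 0:
--                 k = 0
--                 for i in range(0, len(newlist)):
--                     if newlist[i] > 0: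
--                         k = i
--                     else:
--                         break
--                 for i in range(0, k + 1):
--                     newlist[i] -= 1
--                 d += 1
--             elif newlist[0] < 0:
--                 k = 0
--                 for i in range(0, len(newlist)):
--                     if newlist[i] < 0:
--                         k = i
--                     else:
--                         break
--                 for i in range(0, k + 1):
--                     newlist[i] += 1
--                 d += 1
--         return abs(d)
--
-- def zerodisthelper_original(node1, node2):
--     n1 = copy.deepcopy(node1)
--     n2 = copy.deepcopy(node2)
--     temp1 = []
--     temp2 = []
--     while n1:
--         x1 = n1.pop()
--         x2 = n2.pop()
--         if x1 == 0:
--             if x2 == 0: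
--                 temp1.append(x1)
--                 temp2.append(x2)
--             else:
--                 return 1000000
--         else:
--             temp1.append(x1)
--             temp2.append(x2)
--     return distcalc_original(temp1, temp2)
-- ===== SOURCE B (Python) =====
-- def zerodisthelper_original(node1, node2):
--     d = 0
--     prev = 0
--     for x1, x2 in zip(reversed(node1), reversed(node2)):
--         if x1 == 0 and x2 != 0:
--             return 1000000
--         v = x1 - x2
--         if v > 0:
--             d += max(0, v - max(prev, 0))
--         elif v < 0:
--             d += max(0, -v - max(-prev, 0))
--         prev = v
--     return d
-- ===== Notes on version B (the rewrite author's own statement) =====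
-- stated objective: faster
-- what changed: Replaces A's repeated simulation of decrementing/incrementing a same-sign prefix of the difference list (one pass per unit of distance) by a single left-to-right pass that adds max(0, |v| - |prev|) within each same-sign run of the differences, resetting at zeros and sign changes.
import Mathlib
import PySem

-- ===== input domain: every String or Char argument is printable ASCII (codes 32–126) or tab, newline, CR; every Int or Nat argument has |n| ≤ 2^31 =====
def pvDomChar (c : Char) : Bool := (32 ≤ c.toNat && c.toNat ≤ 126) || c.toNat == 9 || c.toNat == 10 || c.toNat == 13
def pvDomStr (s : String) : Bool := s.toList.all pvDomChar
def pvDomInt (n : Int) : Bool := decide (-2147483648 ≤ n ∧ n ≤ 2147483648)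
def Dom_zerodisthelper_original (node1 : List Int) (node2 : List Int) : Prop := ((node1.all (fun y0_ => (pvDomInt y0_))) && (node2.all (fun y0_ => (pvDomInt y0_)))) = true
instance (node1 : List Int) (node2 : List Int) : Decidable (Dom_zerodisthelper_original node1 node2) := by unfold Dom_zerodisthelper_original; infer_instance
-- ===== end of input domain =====

-- B replaces A's repeated decrement-a-prefix simulation (O(n·S), S = total |diff|) by a single
-- O(n) pass summing max(0, |v| - |prev|) within same-sign runs of the difference vector.

-- ===== PORT A =====
-- sum of |x| over the list (termination measure for the while-loop of distcalc_original)
def pvSumAbs (l : List Int) : Nat := (l.map Int.natAbs).sum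

-- Python: k = 0; for i in range(len(newlist)): if newlist[i] > 0: k = i else: break
def kposAux : List Int → Nat → Nat → Nat
  | [], _, k => k
  | x :: t, i, k => if 0 < x then kposAux t (i + 1) i else k

-- Python: same loop with newlist[i] < 0
def knegAux : List Int → Nat → Nat → Nat
  | [], _, k => k
  | x :: t, i, k => if x < 0 then knegAux t (i + 1) i else k

-- Python: for i in range(0, k + 1): newlist[i] -= 1
def decFirst : Nat → List Int → List Int
  | 0, l => l
  | _ + 1, [] => []
  | n + 1, x :: t => (x - 1) :: decFirst n t

-- Python: for i in range(0, k + 1): newlist[i] += 1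
def incFirst : Nat → List Int → List Int
  | 0, l => l
  | _ + 1, [] => []
  | n + 1, x :: t => (x + 1) :: incFirst n t

-- length of the maximal positive (resp. negative) prefix; proof/termination helper
def prun : List Int → Nat
  | [] => 0
  | x :: t => if 0 < x then prun t + 1 else 0

def nrun : List Int → Nat
  | [] => 0
  | x :: t => if x < 0 then nrun t + 1 else 0

theorem kposAux_run : ∀ (l : List Int) (i k : Nat),
    kposAux l i k = if 0 < prun l then i + prun l - 1 else k := by
  intro l
  induction l with
  | nil => intro i k; simp [kposAux, prun]
  | cons x t ih =>
    intro i k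
    by_cases hx : 0 < x
    · simp only [kposAux, prun, if_pos hx, ih]
      split_ifs <;> omega
    · simp [kposAux, prun, hx]

theorem knegAux_run : ∀ (l : List Int) (i k : Nat),
    knegAux l i k = if 0 < nrun l then i + nrun l - 1 else k := by
  intro l
  induction l with
  | nil => intro i k; simp [knegAux, nrun]
  | cons x t ih =>
    intro i k
    by_cases hx : x < 0
    · simp only [knegAux, nrun, if_pos hx, ih]
      split_ifs <;> omega
    · simp [knegAux, nrun, hx]

theorem decFirst_length : ∀ (n : Nat) (l : List Int), (decFirst n l).length = l.length := by
  intro n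
  induction n with
  | zero => intro l; simp [decFirst]
  | succ m ih => intro l; cases l <;> simp [decFirst, ih]

theorem incFirst_length : ∀ (n : Nat) (l : List Int), (incFirst n l).length = l.length := by
  intro n
  induction n with
  | zero => intro l; simp [incFirst]
  | succ m ih => intro l; cases l <;> simp [incFirst, ih]

theorem sumAbs_decFirst : ∀ (l : List Int), pvSumAbs (decFirst (prun l) l) + prun l = pvSumAbs l := by
  intro l
  induction l with
  | nil => simp [prun, decFirst]
  | cons x t ih =>
    by_cases hx : 0 < x
    · simp only [prun, if_pos hx, decFirst, pvSumAbs, List.map, List.sum_cons] at *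
      omega
    · simp [prun, hx, decFirst]

theorem sumAbs_incFirst : ∀ (l : List Int), pvSumAbs (incFirst (nrun l) l) + nrun l = pvSumAbs l := by
  intro l
  induction l with
  | nil => simp [nrun, incFirst]
  | cons x t ih =>
    by_cases hx : x < 0
    · simp only [nrun, if_pos hx, incFirst, pvSumAbs, List.map, List.sum_cons] at *
      omega
    · simp [nrun, hx, incFirst]

theorem kpos_eq (x : Int) (t : List Int) (hx : 0 < x) :
    kposAux (x :: t) 0 0 + 1 = prun (x :: t) := by
  rw [kposAux_run]
  simp only [prun, if_pos hx]
  split_ifs <;> omega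

theorem kneg_eq (x : Int) (t : List Int) (hx : x < 0) :
    knegAux (x :: t) 0 0 + 1 = nrun (x :: t) := by
  rw [knegAux_run]
  simp only [nrun, if_pos hx]
  split_ifs <;> omega

-- Python: the while-loop of distcalc_original, with d accumulated as 1 + recursion
def distloop (l : List Int) : Int :=
  match l with
  | [] => 0
  | x :: t =>
    if x = 0 then distloop t
    else if 0 < x then
      1 + distloop (decFirst (kposAux (x :: t) 0 0 + 1) (x :: t))
    else
      1 + distloop (incFirst (knegAux (x :: t) 0 0 + 1) (x :: t))
termination_by pvSumAbs l + l.length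
decreasing_by
  · simp only [pvSumAbs, List.map, List.sum_cons, List.length_cons]
    omega
  · rename_i hx0 hx
    rw [kpos_eq x t hx]
    have h1 := sumAbs_decFirst (x :: t)
    have h2 := decFirst_length (prun (x :: t)) (x :: t)
    have h3 : 0 < prun (x :: t) := by simp [prun, hx]
    omega
  · rename_i hx0 hx
    have hx' : x < 0 := by omega
    rw [kneg_eq x t hx']
    have h1 := sumAbs_incFirst (x :: t)
    have h2 := incFirst_length (nrun (x :: t)) (x :: t)
    have h3 : 0 < nrun (x :: t) := by simp [nrun, hx']
    omega

-- Python distcalc_original (lengths are equal at every call site)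
def distcalc (node1 : List Int) (node2 : List Int) : Int :=
  if node1.length = 1 then |node1.headD 0 - node2.headD 0|
  else |distloop (List.zipWith (· - ·) node1 node2)|

-- Python: the pop-from-the-end while-loop of zerodisthelper_original; none = IndexError (n2 exhausted)
def zdhLoop : List Int → List Int → List Int → List Int → Option Int
  | [], _, t1, t2 => some (distcalc t1 t2)
  | x1 :: r1, n2, t1, t2 =>
    match n2 with
    | [] => none
    | x2 :: r2 =>
      if x1 = 0 then
        if x2 = 0 then zdhLoop r1 r2 (t1 ++ [x1]) (t2 ++ [x2])
        else some 1000000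
      else zdhLoop r1 r2 (t1 ++ [x1]) (t2 ++ [x2])

def zerodisthelper_original (node1 : List Int) (node2 : List Int) : Int :=
  (zdhLoop node1.reverse node2.reverse [] []).getD 0

-- ===== PORT B =====
-- one pass over the diff pairs (taken from the end, as A pops), carrying (d, prev)
def bgo : Int → Int → List (Int × Int) → Int
  | d, _, [] => d
  | d, prev, (x1, x2) :: rest =>
    if x1 = 0 ∧ x2 ≠ 0 then 1000000
    else
      let v := x1 - x2
      let d' := if 0 < v then d + max 0 (v - max prev 0)
                else if v < 0 then d + max 0 (-v - max (-prev) 0)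
                else d
      bgo d' v rest

def zerodisthelper_original_alt (node1 : List Int) (node2 : List Int) : Int :=
  bgo 0 0 (node1.reverse.zip node2.reverse)

-- ===== PRECONDITION & SPEC =====
-- Pre_ excludes exactly the inputs on which A raises IndexError: len(node1) > len(node2) with no
-- (0, nonzero) pair stopping the pop loop before node2 is exhausted.
def Pre_zerodisthelper_original (node1 : List Int) (node2 : List Int) : Prop :=
  node1.length ≤ node2.length ∨ ∃ p ∈ node1.reverse.zip node2.reverse, p.1 = 0 ∧ p.2 ≠ 0
instance (node1 : List Int) (node2 : List Int) : Decidable (Pre_zerodisthelper_original node1 node2) := by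
  unfold Pre_zerodisthelper_original; infer_instance

def pvWitness_zerodisthelper_original : List Int × List Int := ([1, 2, -1], [0, 2, 1])

def Spec_zerodisthelper_original (node1 : List Int) (node2 : List Int) (out : Int) : Prop := out = zerodisthelper_original_alt node1 node2
instance (node1 : List Int) (node2 : List Int) (out : Int) : Decidable (Spec_zerodisthelper_original node1 node2 out) := by unfold Spec_zerodisthelper_original; infer_instance

-- ===== CLAIM (what is proved, stated in full; the proofs are below) =====
def Claim_equal_zerodisthelper_original : Prop := ∀ (node1 : List Int) (node2 : List Int), Dom_zerodisthelper_original node1 node2 → Pre_zerodisthelper_original node1 node2 → Spec_zerodisthelper_original node1 node2 (zerodisthelper_original node1 node2)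


-- ===== LEMMAS AND PROOFS =====
-- cost of one step of B, and total cost of a diff list starting from a given prev
def stepCost (prev v : Int) : Int :=
  if 0 < v then max 0 (v - max prev 0)
  else if v < 0 then max 0 (-v - max (-prev) 0)
  else 0

def goCost : Int → List Int → Int
  | _, [] => 0
  | prev, v :: vs => stepCost prev v + goCost v vs

def hasBad (ps : List (Int × Int)) : Bool := ps.any (fun p => p.1 == 0 && p.2 != 0)

theorem bgo_char : ∀ (ps : List (Int × Int)) (d prev : Int),
    bgo d prev ps = if hasBad ps then 1000000 else d + goCost prev (ps.map (fun p => p.1 - p.2)) := by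
  intro ps
  induction ps with
  | nil => intro d prev; simp [bgo, hasBad, goCost]
  | cons p rest ih =>
    intro d prev
    obtain ⟨x1, x2⟩ := p
    by_cases hb : x1 = 0 ∧ x2 ≠ 0
    · simp [bgo, hasBad, hb.1, hb.2]
    · simp only [bgo, if_neg hb, ih]
      have hbad : hasBad ((x1, x2) :: rest) = hasBad rest := by
        simp only [hasBad, List.any_cons]
        rcases Decidable.not_and_iff_not_or_not.mp hb with h | h
        · simp [h]
        · simp [Decidable.not_not.mp h]
      rw [hbad]
      simp only [List.map, goCost, stepCost]
      split_ifs <;> ring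
  
theorem goCost_nonneg : ∀ (l : List Int) (prev : Int), 0 ≤ goCost prev l := by
  intro l
  induction l with
  | nil => intro prev; simp [goCost]
  | cons v vs ih =>
    intro prev
    have := ih v
    have : 0 ≤ stepCost prev v := by
      unfold stepCost; split_ifs <;> omega
    simp only [goCost]
    omega

theorem goCost_decPos : ∀ (t : List Int) (p : Int), 1 ≤ p →
    goCost p t = goCost (p - 1) (decFirst (prun t) t) := by
  intro t
  induction t with
  | nil => intro p hp; simp [prun, decFirst, goCost]
  | cons v t' ih =>
    intro p hp
    by_cases hv : 0 < v
    · have hrun : prun (v :: t') = prun t' + 1 := by simp [prun, hv]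
      rw [hrun]
      show goCost p (v :: t') = goCost (p - 1) ((v - 1) :: decFirst (prun t') t')
      simp only [goCost]
      have hstep : stepCost p v = stepCost (p - 1) (v - 1) := by
        unfold stepCost; split_ifs <;> omega
      have h1 : goCost v t' = goCost (v - 1) (decFirst (prun t') t') := ih v hv
      omega
    · have hrun : prun (v :: t') = 0 := by simp [prun, hv]
      rw [hrun]
      show goCost p (v :: t') = goCost (p - 1) (v :: t')
      simp only [goCost]
      have hstep : stepCost p v = stepCost (p - 1) v := by
        unfold stepCost; split_ifs <;> omega
      omega

theorem goCost_incNeg : ∀ (t : List Int) (p : Int), p < 0 →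
    goCost p t = goCost (p + 1) (incFirst (nrun t) t) := by
  intro t
  induction t with
  | nil => intro p hp; simp [nrun, incFirst, goCost]
  | cons v t' ih =>
    intro p hp
    by_cases hv : v < 0
    · have hrun : nrun (v :: t') = nrun t' + 1 := by simp [nrun, hv]
      rw [hrun]
      show goCost p (v :: t') = goCost (p + 1) ((v + 1) :: incFirst (nrun t') t')
      simp only [goCost]
      have hstep : stepCost p v = stepCost (p + 1) (v + 1) := by
        unfold stepCost; split_ifs <;> omega
      have : goCost v t' = goCost (v + 1) (incFirst (nrun t') t') := ih v hv
      omega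
    · have hrun : nrun (v :: t') = 0 := by simp [nrun, hv]
      rw [hrun]
      show goCost p (v :: t') = goCost (p + 1) (v :: t')
      simp only [goCost]
      have hstep : stepCost p v = stepCost (p + 1) v := by
        unfold stepCost; split_ifs <;> omega
      omega

theorem goCost_head_pos (x : Int) (t : List Int) (hx : 0 < x) :
    goCost 0 (x :: t) = 1 + goCost 0 (decFirst (prun (x :: t)) (x :: t)) := by
  have hrun : prun (x :: t) = prun t + 1 := by simp [prun, hx]
  rw [hrun]
  show goCost 0 (x :: t) = 1 + goCost 0 ((x - 1) :: decFirst (prun t) t)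
  simp only [goCost]
  have h1 : goCost x t = goCost (x - 1) (decFirst (prun t) t) := goCost_decPos t x hx
  have h2 : stepCost 0 x = x := by unfold stepCost; rw [if_pos hx]; omega
  have h3 : stepCost 0 (x - 1) = x - 1 := by unfold stepCost; split_ifs <;> omega
  omega

theorem goCost_head_neg (x : Int) (t : List Int) (hx : x < 0) :
    goCost 0 (x :: t) = 1 + goCost 0 (incFirst (nrun (x :: t)) (x :: t)) := by
  have hrun : nrun (x :: t) = nrun t + 1 := by simp [nrun, hx]
  rw [hrun]
  show goCost 0 (x :: t) = 1 + goCost 0 ((x + 1) :: incFirst (nrun t) t)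
  simp only [goCost]
  have h1 : goCost x t = goCost (x + 1) (incFirst (nrun t) t) := goCost_incNeg t x hx
  have h2 : stepCost 0 x = -x := by unfold stepCost; split_ifs <;> omega
  have h3 : stepCost 0 (x + 1) = -(x + 1) := by unfold stepCost; split_ifs <;> omega
  omega

theorem distloop_eq_goCost : ∀ (l : List Int), distloop l = goCost 0 l := by
  intro l
  induction l using distloop.induct with
  | case1 => simp [distloop, goCost]
  | case2 t ih =>
    rw [distloop]
    simp only [if_pos]
    rw [ih]
    simp [goCost, stepCost]
  | case3 x t hx0 hx ih =>
    rw [distloop]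
    rw [if_neg hx0, if_pos hx]
    rw [ih, kpos_eq x t hx]
    exact (goCost_head_pos x t hx).symm
  | case4 x t hx0 hx ih =>
    have hx' : x < 0 := by omega
    rw [distloop]
    rw [if_neg hx0, if_neg hx]
    rw [ih, kneg_eq x t hx']
    exact (goCost_head_neg x t hx').symm

theorem goCost_single (v : Int) : goCost 0 [v] = |v| := by
  simp only [goCost, stepCost, abs_eq_max_neg]
  split_ifs <;> omega

theorem distcalc_eq (t1 t2 : List Int) (h : t1.length = t2.length) :
    distcalc t1 t2 = goCost 0 (List.zipWith (· - ·) t1 t2) := by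
  unfold distcalc
  by_cases h1 : t1.length = 1
  · rw [if_pos h1]
    match t1, t2, h, h1 with
    | [a], [b], _, _ =>
      simp only [List.zipWith, List.headD]
      rw [goCost_single]
  · rw [if_neg h1, distloop_eq_goCost]
    exact abs_of_nonneg (goCost_nonneg _ _)

theorem zdh_char : ∀ (r1 r2 t1 t2 : List Int), r1.length ≤ r2.length →
    zdhLoop r1 r2 t1 t2 =
      some (if hasBad (r1.zip r2) then 1000000
            else distcalc (t1 ++ r1) (t2 ++ r2.take r1.length)) := by
  intro r1
  induction r1 with
  | nil => intro r2 t1 t2 _; simp [zdhLoop, hasBad, List.zip]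
  | cons x1 r1' ih =>
    intro r2 t1 t2 hlen
    cases r2 with
    | nil => simp at hlen
    | cons x2 r2' =>
      have hlen' : r1'.length ≤ r2'.length := by simp at hlen; omega
      have happ1 : t1 ++ x1 :: r1' = (t1 ++ [x1]) ++ r1' := by simp
      have happ2 : t2 ++ x2 :: List.take r1'.length r2' = (t2 ++ [x2]) ++ List.take r1'.length r2' := by simp
      by_cases h0 : x1 = 0
      · by_cases h2 : x2 = 0
        · show zdhLoop (x1 :: r1') (x2 :: r2') t1 t2 = _
          rw [zdhLoop]
          simp only [if_pos h0, if_pos h2]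
          rw [ih r2' (t1 ++ [x1]) (t2 ++ [x2]) hlen']
          have hbad : hasBad ((x1 :: r1').zip (x2 :: r2')) = hasBad (r1'.zip r2') := by
            simp [hasBad, List.zip_cons_cons, h0, h2]
          rw [hbad]
          simp only [List.length_cons, List.take_succ_cons]
          rw [happ1, happ2]
        · show zdhLoop (x1 :: r1') (x2 :: r2') t1 t2 = _
          rw [zdhLoop]
          simp only [if_pos h0, if_neg h2]
          have hbad : hasBad ((x1 :: r1').zip (x2 :: r2')) = true := by
            simp [hasBad, List.zip_cons_cons, h0, h2]
          rw [hbad]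
          simp
      · show zdhLoop (x1 :: r1') (x2 :: r2') t1 t2 = _
        rw [zdhLoop]
        simp only [if_neg h0]
        rw [ih r2' (t1 ++ [x1]) (t2 ++ [x2]) hlen']
        have hbad : hasBad ((x1 :: r1').zip (x2 :: r2')) = hasBad (r1'.zip r2') := by
          simp [hasBad, List.zip_cons_cons, h0]
        rw [hbad]
        simp only [List.length_cons, List.take_succ_cons]
        rw [happ1, happ2]

theorem zdh_bad : ∀ (r1 r2 t1 t2 : List Int), hasBad (r1.zip r2) = true →
    zdhLoop r1 r2 t1 t2 = some 1000000 := by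
  intro r1
  induction r1 with
  | nil => intro r2 t1 t2 hb; simp [hasBad] at hb
  | cons x1 r1' ih =>
    intro r2 t1 t2 hb
    cases r2 with
    | nil => simp [hasBad] at hb
    | cons x2 r2' =>
      by_cases h0 : x1 = 0
      · by_cases h2 : x2 = 0
        · have hb' : hasBad (r1'.zip r2') = true := by
            simpa [hasBad, List.zip_cons_cons, h0, h2] using hb
          show zdhLoop (x1 :: r1') (x2 :: r2') t1 t2 = _
          rw [zdhLoop]
          simp only [if_pos h0, if_pos h2]
          exact ih r2' (t1 ++ [x1]) (t2 ++ [x2]) hb'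
        · show zdhLoop (x1 :: r1') (x2 :: r2') t1 t2 = _
          rw [zdhLoop]
          simp [h0, h2]
      · have hb' : hasBad (r1'.zip r2') = true := by
          simpa [hasBad, List.zip_cons_cons, h0] using hb
        show zdhLoop (x1 :: r1') (x2 :: r2') t1 t2 = _
        rw [zdhLoop]
        simp only [if_neg h0]
        exact ih r2' (t1 ++ [x1]) (t2 ++ [x2]) hb'

theorem hasBad_iff (ps : List (Int × Int)) :
    hasBad ps = true ↔ ∃ p ∈ ps, p.1 = 0 ∧ p.2 ≠ 0 := by
  simp [hasBad, List.any_eq_true]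

theorem zip_take_right : ∀ (r1 r2 : List Int), r1.zip (r2.take r1.length) = r1.zip r2 := by
  intro r1
  induction r1 with
  | nil => intro r2; simp
  | cons x r1' ih =>
    intro r2
    cases r2 with
    | nil => simp
    | cons y r2' => simp [List.zip_cons_cons, ih]

theorem zip_map_sub : ∀ (r1 r2 : List Int),
    (r1.zip r2).map (fun p => p.1 - p.2) = List.zipWith (· - ·) r1 r2 := by
  intro r1
  induction r1 with
  | nil => intro r2; simp
  | cons x r1' ih =>
    intro r2
    cases r2 with
    | nil => simp
    | cons y r2' => simp [List.zip_cons_cons, ih]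

-- ===== VERDICT (by name: the statement is the Claim_ definition above) =====
theorem zerodisthelper_original_spec : Claim_equal_zerodisthelper_original := by
  intro node1 node2 _ hpre
  unfold Spec_zerodisthelper_original
  unfold Pre_zerodisthelper_original at hpre
  set r1 := node1.reverse with hr1
  set r2 := node2.reverse with hr2
  rcases hpre with hpre | hbad
  case inr =>
    have hb : hasBad (r1.zip r2) = true := (hasBad_iff _).mpr hbad
    rw [zerodisthelper_original, zerodisthelper_original_alt]
    rw [zdh_bad r1 r2 [] [] hb, bgo_char, if_pos hb]
    rfl
  have hlen : r1.length ≤ r2.length := by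
    simp [hr1, hr2, hpre]
  have htake : (r2.take r1.length).length = r1.length := by
    simp [List.length_take]; omega
  rw [zerodisthelper_original, zdh_char r1 r2 [] [] hlen]
  rw [zerodisthelper_original_alt]
  rw [bgo_char]
  simp only [Option.getD_some, List.nil_append]
  by_cases hb : hasBad (r1.zip r2)
  · rw [if_pos hb, if_pos hb]
  · rw [if_neg hb, if_neg hb]
    rw [distcalc_eq r1 (r2.take r1.length) htake.symm]
    rw [← zip_map_sub r1 (r2.take r1.length), zip_take_right]
    ring
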